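-- pv_equiv track=rewrite | github.com/brandonsladek/python-bin-packing | bin_packing.py | place_in_columns
-- ===== SOURCE A (Python) =====
-- def place_in_columns(upper_left_x, some_boxes):
--     placement = []
--     upper_left_y = 0
--
--     for tuple in some_boxes:
--         height = tuple[1][1]
--         coordinate = (upper_left_x, upper_left_y)   # make a tuple
--         placement.append((tuple[0], coordinate))
--         upper_left_y = upper_left_y - height
--
--     return placement
-- ===== SOURCE B (Python) =====
-- def place_in_columns(upper_left_x, some_boxes):
--     heights = [box[1][1] for box in some_boxes]
--     prefix = [0]
--     for h in heights:
--         prefix.append(prefix[-1] + h)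
--     offsets = [-p for p in prefix[:len(some_boxes)]]
--     return [(label, (upper_left_x, y))
--             for (label, _), y in zip(some_boxes, offsets)]
-- ===== Notes on version B (the rewrite author's own statement) =====
-- stated objective: alternative
-- what changed: Replaced the single interleaved accumulate-and-append loop with a two-phase decomposition: build a prefix-sum table of the heights first, then zip the box labels with the negated offsets.
import Mathlib
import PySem

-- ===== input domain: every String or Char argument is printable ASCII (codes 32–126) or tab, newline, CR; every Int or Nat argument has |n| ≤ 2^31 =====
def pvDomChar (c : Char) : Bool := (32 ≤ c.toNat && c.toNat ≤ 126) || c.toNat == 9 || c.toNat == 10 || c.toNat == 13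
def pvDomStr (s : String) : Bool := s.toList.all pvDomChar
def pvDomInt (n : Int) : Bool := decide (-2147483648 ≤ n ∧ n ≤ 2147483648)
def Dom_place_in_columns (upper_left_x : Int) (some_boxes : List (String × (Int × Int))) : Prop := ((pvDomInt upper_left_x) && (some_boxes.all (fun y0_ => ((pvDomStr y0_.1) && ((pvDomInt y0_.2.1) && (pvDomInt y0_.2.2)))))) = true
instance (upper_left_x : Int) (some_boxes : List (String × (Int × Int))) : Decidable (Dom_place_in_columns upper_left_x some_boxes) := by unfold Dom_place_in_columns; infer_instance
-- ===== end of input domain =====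

-- B replaces A's interleaved accumulate-and-append loop with a prefix-sum table of heights zipped with the labels; same cost, different decomposition.


-- ===== PORT A =====
-- A: one loop carrying (placement, upper_left_y); appends and subtracts the height each step.
def place_in_columns (upper_left_x : Int) (some_boxes : List (String × (Int × Int))) : List (String × (Int × Int)) :=
  (some_boxes.foldl
    (fun (st : List (String × (Int × Int)) × Int) t =>
      (st.1 ++ [(t.1, (upper_left_x, st.2))], st.2 - t.2.2))
    ([], 0)).1

-- ===== PORT B =====
-- B helper: the prefix-sum loop of Source B (running value carried as the accumulator).
def pvPrefix (acc : Int) : List Int → List Int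
  | [] => [acc]
  | h :: t => acc :: pvPrefix (acc + h) t

def place_in_columns_alt (upper_left_x : Int) (some_boxes : List (String × (Int × Int))) : List (String × (Int × Int)) :=
  let heights := some_boxes.map (fun b => b.2.2)
  let prefixes := pvPrefix 0 heights
  let offsets := (prefixes.take some_boxes.length).map (fun p => -p)
  (some_boxes.zip offsets).map (fun p => (p.1.1, (upper_left_x, p.2)))

-- ===== PRECONDITION & SPEC =====
def Spec_place_in_columns (upper_left_x : Int) (some_boxes : List (String × (Int × Int))) (out : List (String × (Int × Int))) : Prop := out = place_in_columns_alt upper_left_x some_boxes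
instance (upper_left_x : Int) (some_boxes : List (String × (Int × Int))) (out : List (String × (Int × Int))) : Decidable (Spec_place_in_columns upper_left_x some_boxes out) := by unfold Spec_place_in_columns; infer_instance

-- ===== CLAIM (what is proved, stated in full; the proofs are below) =====
def Claim_equal_place_in_columns : Prop := ∀ (upper_left_x : Int) (some_boxes : List (String × (Int × Int))), Dom_place_in_columns upper_left_x some_boxes → Spec_place_in_columns upper_left_x some_boxes (place_in_columns upper_left_x some_boxes)

-- ===== LEMMAS AND PROOFS =====

theorem pvPrefix_shift (hs : List Int) (a b : Int) :
    pvPrefix (a + b) hs = (pvPrefix b hs).map (fun p => a + p) := by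
  induction hs generalizing b with
  | nil => simp [pvPrefix]
  | cons h t ih =>
      simp only [pvPrefix, List.map]
      rw [add_assoc, ih]

theorem pvPrefix_eq (hs : List Int) (a : Int) :
    pvPrefix a hs = (pvPrefix 0 hs).map (fun p => a + p) := by
  conv_lhs => rw [show a = a + 0 by ring]
  rw [pvPrefix_shift]

theorem place_in_columns_fold (upper_left_x : Int) (some_boxes : List (String × (Int × Int)))
    (acc : List (String × (Int × Int))) (y : Int) :
    (some_boxes.foldl
      (fun (st : List (String × (Int × Int)) × Int) t =>
        (st.1 ++ [(t.1, (upper_left_x, st.2))], st.2 - t.2.2))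
      (acc, y)).1 =
    acc ++ (some_boxes.zip
      (((pvPrefix 0 (some_boxes.map (fun b => b.2.2))).take some_boxes.length).map
        (fun p => y + -p))).map (fun p => (p.1.1, (upper_left_x, p.2))) := by
  induction some_boxes generalizing acc y with
  | nil => simp
  | cons b t ih =>
      simp only [List.foldl, List.map_cons, List.length_cons, pvPrefix, List.take_succ_cons,
        List.zip_cons_cons, List.map_cons]
      rw [ih, zero_add]
      conv_rhs => rw [pvPrefix_eq]
      simp only [List.map_take, List.map_map, neg_zero, add_zero,
        List.append_assoc, List.singleton_append]
      congr 5
      refine List.map_congr_left fun p _ => ?_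
      simp only [Function.comp_apply]
      ring

theorem place_in_columns_spec : Claim_equal_place_in_columns := by
  intro upper_left_x some_boxes _
  unfold Spec_place_in_columns place_in_columns place_in_columns_alt
  rw [place_in_columns_fold]
  simp
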